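-- pv_equiv track=rewrite | github.com/NiccoloAntonelliDziri/project-work | s350296.py | to_routes
-- ===== SOURCE A (Python) =====
-- def to_routes(formatted_path):
--     """
--     Converts a sequential path of (node, gold_collected) tuples
--     back into a list of routes (each starting and ending with 0).
--     Filters out intermediate nodes that didn't collect gold to restore checkpoints.
--     Input Format: [(c1, g1), (c2, g2), ..., (cN, gN), (0, 0)]
--     Output Format: [[0, c1, ..., cN, 0], [0, ...], ...]
--     """
--     routes = []
--     current_route = [0]
--     for node, gold in formatted_path:
--         # Keep nodes where gold was collected or the depot
--         if gold > 0 or node == 0: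
--             current_route.append(node)
--
--         if node == 0:
--              if len(current_route) > 1:
--                  routes.append(current_route)
--              current_route = [0]
--     return routes
-- ===== SOURCE B (Python) =====
-- def to_routes(formatted_path):
--     routes = []
--     rest = formatted_path
--     while True:
--         i = 0
--         while i < len(rest) and rest[i][0] != 0:
--             i += 1
--         if i == len(rest):
--             return routes
--         routes.append([0] + [n for n, g in rest[:i] if g > 0] + [0])
--         rest = rest[i + 1:]
-- ===== Notes on version B (the rewrite author's own statement) =====
-- stated objective: alternative
-- what changed: A builds routes in one accumulate-as-you-go pass over the tuples; B instead repeatedly scans the remaining list for the next depot index, slices the segment before it, filters it for gold>0 and wraps it in [0,...,0].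
import Mathlib
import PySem

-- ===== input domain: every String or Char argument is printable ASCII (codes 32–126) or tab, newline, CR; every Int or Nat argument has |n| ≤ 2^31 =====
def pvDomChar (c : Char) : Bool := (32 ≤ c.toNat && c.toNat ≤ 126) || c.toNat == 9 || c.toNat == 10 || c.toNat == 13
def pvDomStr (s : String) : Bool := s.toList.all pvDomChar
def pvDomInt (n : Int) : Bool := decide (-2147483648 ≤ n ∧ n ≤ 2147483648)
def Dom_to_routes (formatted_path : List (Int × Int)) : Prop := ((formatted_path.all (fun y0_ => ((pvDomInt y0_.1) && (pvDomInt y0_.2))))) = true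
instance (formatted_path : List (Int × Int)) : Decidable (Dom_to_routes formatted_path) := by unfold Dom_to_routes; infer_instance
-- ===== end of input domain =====

-- B replaces A's single accumulate-as-you-go pass by repeatedly scanning for the next depot
-- and slicing the segment before it (alternative decomposition; same cost).

-- ===== PORT A =====
-- one loop iteration of A: state = (routes, current_route)
def pvStepA (s : List (List Int) × List Int) (ng : Int × Int) : List (List Int) × List Int :=
  let cur := if ng.2 > 0 || ng.1 == 0 then s.2 ++ [ng.1] else s.2
  if ng.1 == 0 then
    (if cur.length > 1 then s.1 ++ [cur] else s.1, [0])
  else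
    (s.1, cur)

def to_routes (formatted_path : List (Int × Int)) : List (List Int) :=
  (formatted_path.foldl pvStepA ([], [0])).1

-- ===== PORT B =====
-- inner while loop of B: index of the first depot in rest (= length if none)
def pvScanZero : List (Int × Int) → Nat
  | [] => 0
  | ng :: t => if ng.1 == 0 then 0 else pvScanZero t + 1

theorem pvScanZero_le (l : List (Int × Int)) : pvScanZero l ≤ l.length := by
  induction l with
  | nil => simp [pvScanZero]
  | cons h t ih =>
    by_cases hz : h.1 == 0
    · simp [pvScanZero, hz]
    · simp [pvScanZero, hz]; omega

-- outer while loop of B: state = (routes, rest)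
def pvLoopB (routes : List (List Int)) (rest : List (Int × Int)) : List (List Int) :=
  let i := pvScanZero rest
  if i = rest.length then routes
  else pvLoopB
    (routes ++ [[0] ++ ((rest.take i).filter (fun p => decide (p.2 > 0))).map Prod.fst ++ [0]])
    (rest.drop (i + 1))
termination_by rest.length
decreasing_by
  rename_i h
  have h1 := pvScanZero_le rest
  simp only [List.length_drop]
  omega

def to_routes_alt (formatted_path : List (Int × Int)) : List (List Int) :=
  pvLoopB [] formatted_path

-- ===== PRECONDITION & SPEC =====
def Spec_to_routes (formatted_path : List (Int × Int)) (out : List (List Int)) : Prop := out = to_routes_alt formatted_path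
instance (formatted_path : List (Int × Int)) (out : List (List Int)) : Decidable (Spec_to_routes formatted_path out) := by unfold Spec_to_routes; infer_instance

-- ===== CLAIM (what is proved, stated in full; the proofs are below) =====
def Claim_equal_to_routes : Prop := ∀ (formatted_path : List (Int × Int)), Dom_to_routes formatted_path → Spec_to_routes formatted_path (to_routes formatted_path)

-- ===== LEMMAS AND PROOFS =====

-- reference recursion: the routes A will still emit given the pending current_route cur
def pvRoutesFrom (cur : List Int) : List (Int × Int) → List (List Int)
  | [] => []
  | ng :: t =>
    if ng.1 == 0 then (cur ++ [0]) :: pvRoutesFrom [0] t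
    else pvRoutesFrom (if ng.2 > 0 then cur ++ [ng.1] else cur) t

theorem pvFoldA_eq (fp : List (Int × Int)) :
    ∀ (R : List (List Int)) (cur : List Int), cur ≠ [] →
    (fp.foldl pvStepA (R, cur)).1 = R ++ pvRoutesFrom cur fp := by
  induction fp with
  | nil => intro R cur _; simp [pvRoutesFrom]
  | cons ng t ih =>
    obtain ⟨n, g⟩ := ng
    intro R cur hcur
    simp only [List.foldl_cons]
    by_cases hz : n == 0
    · have hn : n = 0 := eq_of_beq hz
      subst hn
      have h1 : 0 < cur.length := List.length_pos_iff.mpr hcur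
      simp [pvStepA, pvRoutesFrom, h1, ih _ [0] (by simp)]
    · by_cases hg : (0 : Int) < g
      · simp [pvStepA, pvRoutesFrom, hz, hg, ih _ (cur ++ [n]) (by simp)]
      · simp [pvStepA, pvRoutesFrom, hz, hg, ih _ cur hcur]

theorem pvRoutesFrom_scan (fp : List (Int × Int)) :
    ∀ (cur : List Int), pvRoutesFrom cur fp =
      if pvScanZero fp = fp.length then []
      else (cur ++ ((fp.take (pvScanZero fp)).filter (fun p => decide (p.2 > 0))).map Prod.fst ++ [0])
        :: pvRoutesFrom [0] (fp.drop (pvScanZero fp + 1)) := by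
  induction fp with
  | nil => intro cur; simp [pvRoutesFrom, pvScanZero]
  | cons ng t ih =>
    obtain ⟨n, g⟩ := ng
    intro cur
    by_cases hz : n == 0
    · simp [pvRoutesFrom, pvScanZero, hz]
    · by_cases hg : (0 : Int) < g <;> by_cases hlen : pvScanZero t = t.length <;>
        simp [pvRoutesFrom, pvScanZero, hz, hg, hlen, ih]

theorem pvLoopB_eq (routes : List (List Int)) (rest : List (Int × Int)) :
    pvLoopB routes rest = routes ++ pvRoutesFrom [0] rest := by
  induction routes, rest using pvLoopB.induct with
  | case1 routes rest i hstop =>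
    rw [pvLoopB, if_pos hstop, pvRoutesFrom_scan, if_pos hstop, List.append_nil]
  | case2 routes rest i hstop ih =>
    rw [pvLoopB, if_neg hstop, ih, pvRoutesFrom_scan rest [0], if_neg hstop]
    simp
    exact ⟨rfl, rfl⟩

-- ===== VERDICT (by name: the statement is the Claim_ definition above) =====
theorem to_routes_spec : Claim_equal_to_routes := by
  intro fp _
  show to_routes fp = to_routes_alt fp
  rw [to_routes, to_routes_alt, pvFoldA_eq fp [] [0] (by simp), pvLoopB_eq]
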